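-- pv_equiv track=rewrite | github.com/Oblivalny/invest | src/app/Assets.py | get_maximum_drawdown
-- ===== SOURCE A (Python) =====
-- def get_maximum_drawdown(predict):
--     """ Максимальная просадка(MDD) – это показатель наибольшего падения цены актива от пика до минимума. """
--     iter_sum = 0
--     i = 0
--     prev_value = predict[0]
--     result = []
--
--     for vl in predict:
--
--         if vl <= prev_value:
--             iter_sum = iter_sum + (prev_value - vl)
--         elif iter_sum > 0:
--             result.append(iter_sum)
--             iter_sum = 0
--         else:
--             iter_sum = 0
--
--         prev_value = vl
--
--         i = i + 1
--
--         if i == len(predict):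
--             result.append(iter_sum)
--
--     return max(result)
-- ===== SOURCE B (Python) =====
-- def get_maximum_drawdown(predict):
--     """ Maximum drawdown via a two-pointer scan over indices: split the series
--         into maximal non-increasing runs; the summed decline of a run
--         telescopes to its start value minus its end value. """
--     n = len(predict)
--     best = 0
--     i = 0
--     while i < n:
--         j = i + 1
--         while j < n and predict[j] <= predict[j - 1]:
--             j += 1
--         best = max(best, predict[i] - predict[j - 1])
--         i = j
--     return best
-- ===== Notes on version B (the rewrite author's own statement) =====
-- stated objective: alternative
-- what changed: Replaces A's single pass that accumulates per-step declines into iter_sum, appends completed drawdowns to a result list and takes max(result), by a two-pointer index scan that splits the series into maximal non-increasing runs and telescopes each run's total decline to predict[run start] - predict[run end], keeping only a running max.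
import Mathlib
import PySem

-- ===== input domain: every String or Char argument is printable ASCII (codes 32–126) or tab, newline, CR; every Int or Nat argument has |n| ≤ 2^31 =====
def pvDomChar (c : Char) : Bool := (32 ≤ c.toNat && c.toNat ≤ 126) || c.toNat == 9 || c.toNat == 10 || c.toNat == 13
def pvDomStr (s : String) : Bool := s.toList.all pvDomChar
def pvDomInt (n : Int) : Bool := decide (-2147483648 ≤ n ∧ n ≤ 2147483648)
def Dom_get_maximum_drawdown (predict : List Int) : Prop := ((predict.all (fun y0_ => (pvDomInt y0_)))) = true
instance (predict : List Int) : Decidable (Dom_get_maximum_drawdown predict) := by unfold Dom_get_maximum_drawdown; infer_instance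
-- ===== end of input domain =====

-- B replaces A's per-step accumulation (iter_sum, result list, max(result)) by a two-pointer
-- scan over indices that telescopes each maximal non-increasing run to start - end: alternative algorithm, O(1) space.

-- ===== PORT A =====
-- loop body of A; L = len(predict), acc = (iter_sum, i, prev_value, result)
def pvStepA (L : Int) (acc : Int × Int × Int × List Int) (vl : Int) : Int × Int × Int × List Int :=
  let iter_sum := acc.1
  let i := acc.2.1
  let prev := acc.2.2.1
  let result := acc.2.2.2
  let p : Int × List Int :=
    if vl ≤ prev then (iter_sum + (prev - vl), result)
    else if iter_sum > 0 then (0, result ++ [iter_sum])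
    else (0, result)
  let iter_sum := p.1
  let result := p.2
  let i := i + 1
  let result := if i = L then result ++ [iter_sum] else result
  (iter_sum, i, vl, result)

def get_maximum_drawdown (predict : List Int) : Int :=
  match PySem.List.pyGet? predict 0 with
  | none => 0  -- predict[0] raises IndexError in Python: excluded by Pre_
  | some p0 =>
      let st := predict.foldl (pvStepA (predict.length : Int)) (0, 0, p0, [])
      (PySem.List.max? st.2.2.2 (fun y => y)).getD 0  -- max(result); result is nonempty whenever predict is

-- ===== PORT B =====
-- inner while loop of B: advance j while j < n and predict[j] <= predict[j-1]
-- (both indices are in range whenever the guard's first conjunct holds and 1 ≤ j, so getD's default is never used)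
def pvInner (predict : List Int) (n j : Int) : Int :=
  if j < n ∧ (PySem.List.pyGet? predict j).getD 0 ≤ (PySem.List.pyGet? predict (j - 1)).getD 0 then
    pvInner predict n (j + 1)
  else j
termination_by (n - j).toNat
decreasing_by omega

-- termination fact the outer loop's recursion cites: the inner loop never moves j backwards
theorem pvInner_ge (predict : List Int) (n : Int) : ∀ j : Int, j ≤ pvInner predict n j := by
  intro j
  fun_induction pvInner predict n j with
  | case1 j h ih => omega
  | case2 j h => omega

-- outer while loop of B; state (i, best)
def pvOuter (predict : List Int) (n i best : Int) : Int :=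
  if i < n then
    let j := pvInner predict n (i + 1)
    pvOuter predict n j
      (max best ((PySem.List.pyGet? predict i).getD 0 - (PySem.List.pyGet? predict (j - 1)).getD 0))
  else best
termination_by (n - i).toNat
decreasing_by have := pvInner_ge predict n (i + 1); omega

def get_maximum_drawdown_alt (predict : List Int) : Int :=
  pvOuter predict (PySem.List.len predict) 0 0

-- ===== PRECONDITION & SPEC =====
-- A raises IndexError on the empty list (predict[0]); nothing else raises.
def Pre_get_maximum_drawdown (predict : List Int) : Prop := predict ≠ []
instance (predict : List Int) : Decidable (Pre_get_maximum_drawdown predict) := by unfold Pre_get_maximum_drawdown; infer_instance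

def pvWitness_get_maximum_drawdown : List Int := [5, 3, 4, 1, 2]

def Spec_get_maximum_drawdown (predict : List Int) (out : Int) : Prop := out = get_maximum_drawdown_alt predict
instance (predict : List Int) (out : Int) : Decidable (Spec_get_maximum_drawdown predict out) := by unfold Spec_get_maximum_drawdown; infer_instance

-- ===== CLAIM (what is proved, stated in full; the proofs are below) =====
def Claim_equal_get_maximum_drawdown : Prop := ∀ (predict : List Int), Dom_get_maximum_drawdown predict → Pre_get_maximum_drawdown predict → Spec_get_maximum_drawdown predict (get_maximum_drawdown predict)

-- ===== LEMMAS AND PROOFS =====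

-- proof-only helper: the online scalar fold (prev, cur, best) intermediate between A and B
def pvStepB (acc : Int × Int × Int) (vl : Int) : Int × Int × Int :=
  let cur := if vl ≤ acc.1 then acc.2.1 + (acc.1 - vl) else 0
  let best := if cur > acc.2.2 then cur else acc.2.2
  (vl, cur, best)

-- proof-only helper: run-splitting recursion; pvGo s p t = max drawdown of (runStart = s, prev = p, rest = t)
def pvGo (s p : Int) : List Int → Int
  | [] => s - p
  | v :: t => if v ≤ p then pvGo s v t else max (s - p) (pvGo v v t)

-- if-formulation of max
theorem pv_if_max (x y : Int) : (if x > y then x else y) = max y x := by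
  split_ifs with h <;> omega

-- A's fold only appends to the carried result list
theorem pv_foldA_acc (L : Int) : ∀ (xs : List Int) (s i p : Int) (r : List Int),
    xs.foldl (pvStepA L) (s, i, p, r)
      = ((xs.foldl (pvStepA L) (s, i, p, [])).1,
         (xs.foldl (pvStepA L) (s, i, p, [])).2.1,
         (xs.foldl (pvStepA L) (s, i, p, [])).2.2.1,
         r ++ (xs.foldl (pvStepA L) (s, i, p, [])).2.2.2) := by
  intro xs
  induction xs with
  | nil => intro s i p r; simp [List.foldl]
  | cons v t ih =>
      intro s i p r
      simp only [List.foldl]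
      rw [ih]
      conv_rhs => rw [ih]
      simp only [pvStepA]
      split_ifs <;> simp

-- scalar fold: best seed distributes over max
theorem pv_foldB_seed : ∀ (xs : List Int) (p c a b : Int),
    (xs.foldl pvStepB (p, c, max a b)).2.2 = max a (xs.foldl pvStepB (p, c, b)).2.2 := by
  intro xs
  induction xs with
  | nil => intro p c a b; simp
  | cons v t ih =>
      intro p c a b
      simp only [List.foldl, pvStepB, pv_if_max]
      rw [max_assoc, ih]

-- scalar fold: best never decreases
theorem pv_foldB_ge : ∀ (xs : List Int) (p c b : Int), b ≤ (xs.foldl pvStepB (p, c, b)).2.2 := by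
  intro xs
  induction xs with
  | nil => intro p c b; simp
  | cons v t ih =>
      intro p c b
      simp only [List.foldl, pvStepB, pv_if_max]
      exact le_trans (le_max_left _ _) (ih _ _ _)

theorem pv_foldl_max_init : ∀ (t : List Int) (a b : Int),
    t.foldl max (max a b) = max a (t.foldl max b) := by
  intro t
  induction t with
  | nil => intro a b; simp
  | cons x t ih =>
      intro a b
      simp only [List.foldl]
      rw [max_assoc, ih]

-- main invariant on the A side: A's appended drawdowns have first maximum = the scalar fold's best
theorem pv_main (L : Int) : ∀ (xs : List Int) (v i s p : Int),
    i + 1 + (xs.length : Int) = L → 0 ≤ s →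
    PySem.List.max? (((v :: xs).foldl (pvStepA L) (s, i, p, [])).2.2.2) (fun y => y)
      = some (((v :: xs).foldl pvStepB (p, s, s)).2.2) := by
  intro xs
  induction xs with
  | nil =>
      intro v i s p hL hs
      simp only [List.length_nil, Int.natCast_zero, add_zero] at hL
      simp only [List.foldl, pvStepA, pvStepB, hL, pv_if_max]
      split_ifs with h1 h2 <;>
        simp [PySem.List.max?_id_cons, List.foldl] <;> omega
  | cons w t ih =>
      intro v i s p hL hs
      have hne : ¬ (i + 1 = L) := by
        simp only [List.length_cons] at hL; push_cast at hL; omega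
      have hlen : i + 1 + 1 + (t.length : Int) = L := by
        simp only [List.length_cons] at hL; push_cast at hL ⊢; omega
      set s1 : Int := if v ≤ p then s + (p - v) else 0 with hs1
      have hs1nn : 0 ≤ s1 := by rw [hs1]; split_ifs with h <;> omega
      have IH := ih w (i + 1) s1 v hlen hs1nn
      have hge : s1 ≤ ((w :: t).foldl pvStepB (v, s1, s1)).2.2 := pv_foldB_ge _ _ _ _
      have hBgoal : ((v :: w :: t).foldl pvStepB (p, s, s)).2.2
          = max s ((w :: t).foldl pvStepB (v, s1, s1)).2.2 := by
        rw [List.foldl_cons]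
        have h1 : pvStepB (p, s, s) v = (v, s1, max s s1) := by
          simp only [pvStepB, pv_if_max, hs1]
        rw [h1]
        exact pv_foldB_seed _ _ _ _ _
      rw [hBgoal]
      by_cases hc : v ≤ p
      · -- decline step: nothing appended, s ≤ s1
        have hstep : pvStepA L (s, i, p, []) v = (s1, i + 1, v, []) := by
          simp only [pvStepA, if_pos hc, if_neg hne, hs1]
        rw [List.foldl_cons, hstep, IH]
        have hss1 : s ≤ s1 := by rw [hs1, if_pos hc]; omega
        rw [max_eq_right (le_trans hss1 hge)]
      · have hs1z : s1 = 0 := by rw [hs1, if_neg hc]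
        by_cases hpos : s > 0
        · -- rise step, s gets appended to result
          have hstep : pvStepA L (s, i, p, []) v = (0, i + 1, v, [s]) := by
            simp only [pvStepA, if_neg hc, if_pos hpos, if_neg hne, List.nil_append]
          rw [List.foldl_cons, hstep]
          have hA : ((w :: t).foldl (pvStepA L) (0, i + 1, v, [s])).2.2.2
              = s :: ((w :: t).foldl (pvStepA L) (0, i + 1, v, [])).2.2.2 := by
            rw [pv_foldA_acc]; simp
          rw [hA]
          rw [hs1z] at IH
          obtain ⟨d0, dt, hd⟩ : ∃ d0 dt,
              ((w :: t).foldl (pvStepA L) (0, i + 1, v, [])).2.2.2 = d0 :: dt := by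
            rcases h : ((w :: t).foldl (pvStepA L) (0, i + 1, v, [])).2.2.2 with _ | ⟨d0, dt⟩
            · rw [h] at IH; simp [PySem.List.max?] at IH
            · exact ⟨d0, dt, rfl⟩
          rw [hd] at IH
          rw [hd, PySem.List.max?_id_cons]
          rw [PySem.List.max?_id_cons] at IH
          simp only [List.foldl_cons]
          rw [pv_foldl_max_init, hs1z, Option.some.inj IH]
          simp only [List.foldl_cons]
        · -- rise step, s = 0: nothing appended
          have hsz : s = 0 := by omega
          have hstep : pvStepA L (s, i, p, []) v = (0, i + 1, v, []) := by
            simp only [pvStepA, if_neg hc, if_neg hpos, if_neg hne]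
          rw [List.foldl_cons, hstep]
          rw [hs1z] at IH hge ⊢
          rw [IH, hsz, max_eq_right hge]

-- the run head's telescoped drawdown bounds pvGo from below
theorem pvGo_ge (t : List Int) : ∀ (s p : Int), s - p ≤ pvGo s p t := by
  induction t with
  | nil => intro s p; simp [pvGo]
  | cons v t ih =>
      intro s p
      simp only [pvGo]
      split_ifs with h
      · have := ih s v; omega
      · exact le_max_left _ _
-- the scalar fold equals the run-splitting recursion
theorem pv_scalar_go : ∀ (t : List Int) (p s b : Int), s - p ≤ b →
    (t.foldl pvStepB (p, s - p, b)).2.2 = max b (pvGo s p t) := by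
  intro t
  induction t with
  | nil => intro p s b hb; simp [pvGo]; omega
  | cons v t ih =>
      intro p s b hb
      rw [List.foldl_cons]
      by_cases hc : v ≤ p
      · have h1 : pvStepB (p, s - p, b) v = (v, s - v, max b (s - v)) := by
          simp only [pvStepB, if_pos hc, pv_if_max]
          have : s - p + (p - v) = s - v := by ring
          rw [this]
        rw [h1, ih v s (max b (s - v)) (le_max_right _ _)]
        have hgo := pvGo_ge t s v
        simp only [pvGo, if_pos hc]
        rw [max_assoc]
        have : max (s - v) (pvGo s v t) = pvGo s v t := max_eq_right hgo
        rw [this]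
      · have h1 : pvStepB (p, s - p, b) v = (v, v - v, max b 0) := by
          simp only [pvStepB, if_neg hc, pv_if_max]
          norm_num
        rw [h1, ih v v (max b 0) (by omega)]
        have hgo := pvGo_ge t v v
        simp only [pvGo, if_neg hc]
        simp only [Int.max_def]
        split_ifs <;> omega

-- A equals the run-splitting recursion
theorem pvA_go (v : Int) (t : List Int) :
    get_maximum_drawdown (v :: t) = pvGo v v t := by
  unfold get_maximum_drawdown
  rw [PySem.List.pyGet?_zero_cons]
  have hlen : (0 : Int) + 1 + (t.length : Int) = ((v :: t).length : Int) := by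
    simp [List.length_cons]; omega
  have hmain := pv_main ((v :: t).length : Int) t v 0 0 v hlen le_rfl
  simp only [hmain, Option.getD_some]
  rw [List.foldl_cons]
  have h1 : pvStepB (v, 0, 0) v = (v, v - v, 0) := by
    simp [pvStepB]
  rw [h1]
  rw [pv_scalar_go t v v 0 (by omega)]
  have := pvGo_ge t v v
  omega

-- inner loop, advance step
theorem pvInner_advance (predict : List Int) (j : Nat) (v p : Int)
    (hj : predict[j]? = some v) (hj1 : predict[j - 1]? = some p) (h1 : 1 ≤ j) (hvp : v ≤ p) :
    pvInner predict (predict.length : Int) (j : Int) = pvInner predict (predict.length : Int) ((j : Int) + 1) := by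
  have hjl : j < predict.length := (List.getElem?_eq_some_iff.mp hj).1
  rw [pvInner]
  rw [if_pos]
  refine ⟨by exact_mod_cast hjl, ?_⟩
  have e1 : PySem.List.pyGet? predict (j : Int) = some v := by
    rw [PySem.List.pyGet?_natCast, hj]
  have e2 : (j : Int) - 1 = ((j - 1 : Nat) : Int) := by omega
  have e3 : PySem.List.pyGet? predict ((j : Int) - 1) = some p := by
    rw [e2, PySem.List.pyGet?_natCast, hj1]
  rw [e1, e3]
  exact hvp

-- inner loop, stop step (a rise)
theorem pvInner_stop (predict : List Int) (j : Nat) (v p : Int)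
    (hj : predict[j]? = some v) (hj1 : predict[j - 1]? = some p) (h1 : 1 ≤ j) (hvp : ¬ v ≤ p) :
    pvInner predict (predict.length : Int) (j : Int) = (j : Int) := by
  rw [pvInner, if_neg]
  intro ⟨_, hle⟩
  have e1 : PySem.List.pyGet? predict (j : Int) = some v := by
    rw [PySem.List.pyGet?_natCast, hj]
  have e2 : (j : Int) - 1 = ((j - 1 : Nat) : Int) := by omega
  have e3 : PySem.List.pyGet? predict ((j : Int) - 1) = some p := by
    rw [e2, PySem.List.pyGet?_natCast, hj1]
  rw [e1, e3] at hle
  simp at hle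
  exact hvp hle

-- inner loop, off the end
theorem pvInner_end (predict : List Int) :
    pvInner predict (predict.length : Int) (predict.length : Int) = (predict.length : Int) := by
  rw [pvInner, if_neg]
  intro ⟨h, _⟩
  omega

-- main bridge: from any run-start boundary, the two-pointer loops compute pvGo
theorem pvMB (predict : List Int) : ∀ (t : List Int) (j : Nat) (s p b : Int),
    1 ≤ j → predict.drop j = t → predict[j - 1]? = some p →
    pvOuter predict (predict.length : Int) (pvInner predict (predict.length : Int) (j : Int))
      (max b (s - (PySem.List.pyGet? predict (pvInner predict (predict.length : Int) (j : Int) - 1)).getD 0))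
    = max b (pvGo s p t) := by
  intro t
  induction t with
  | nil =>
      intro j s p b h1 hdrop hj1
      have hjlen : predict.length ≤ j := by
        by_contra h
        have := List.drop_eq_nil_iff.mp hdrop
        omega
      have hjle : j ≤ predict.length := by
        have := (List.getElem?_eq_some_iff.mp hj1).1
        omega
      have hj : j = predict.length := by omega
      subst hj
      rw [pvInner_end]
      rw [pvOuter, if_neg (by omega)]
      have e2 : (predict.length : Int) - 1 = ((predict.length - 1 : Nat) : Int) := by omega
      rw [e2, PySem.List.pyGet?_natCast, hj1, Option.getD_some]
      simp [pvGo]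
  | cons v t' ih =>
      intro j s p b h1 hdrop hj1
      have hv : predict[j]? = some v := by
        rw [← List.head?_drop, hdrop]; rfl
      have hdrop' : predict.drop (j + 1) = t' := by
        have : predict.drop (j + 1) = (predict.drop j).tail := by
          rw [List.tail_drop]
        rw [this, hdrop]; rfl
      have hjl : j < predict.length := (List.getElem?_eq_some_iff.mp hv).1
      have hv' : predict[(j + 1) - 1]? = some v := by simpa using hv
      have hcast : ((j : Int) + 1) = ((j + 1 : Nat) : Int) := by omega
      by_cases hc : v ≤ p
      · rw [pvInner_advance predict j v p hv hj1 h1 hc, hcast]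
        rw [ih (j + 1) s v b (by omega) hdrop' hv']
        simp only [pvGo, if_pos hc]
      · rw [pvInner_stop predict j v p hv hj1 h1 hc]
        have e2 : (j : Int) - 1 = ((j - 1 : Nat) : Int) := by omega
        rw [e2, PySem.List.pyGet?_natCast, hj1, Option.getD_some]
        rw [pvOuter, if_pos (by exact_mod_cast hjl)]
        have ev : (PySem.List.pyGet? predict (j : Int)).getD 0 = v := by
          rw [PySem.List.pyGet?_natCast, hv, Option.getD_some]
        rw [ev, hcast]
        rw [ih (j + 1) v v (max b (s - p)) (by omega) hdrop' hv']
        simp only [pvGo, if_neg hc]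
        rw [max_assoc]

-- B equals the run-splitting recursion
theorem pvB_go (v : Int) (t : List Int) :
    get_maximum_drawdown_alt (v :: t) = pvGo v v t := by
  unfold get_maximum_drawdown_alt
  rw [PySem.List.len_eq]
  rw [pvOuter, if_pos (by simp)]
  have e0 : (PySem.List.pyGet? (v :: t) 0).getD 0 = v := by
    rw [PySem.List.pyGet?_zero_cons, Option.getD_some]
  rw [e0]
  have hcast : (0 : Int) + 1 = ((1 : Nat) : Int) := by omega
  rw [hcast]
  have := pvMB (v :: t) t 1 v v 0 (by omega) (by simp) (by simp)
  rw [this]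
  have := pvGo_ge t v v
  omega

-- ===== VERDICT (by name: the statement is the Claim_ definition above) =====
theorem get_maximum_drawdown_spec : Claim_equal_get_maximum_drawdown := by
  intro predict _ hpre
  rcases predict with _ | ⟨v, t⟩
  · exact absurd rfl hpre
  unfold Spec_get_maximum_drawdown
  rw [pvA_go, pvB_go]
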